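-- pv_equiv track=rewrite | github.com/tyc45/Tech_iA_python_introduction | codewars_exercices.py | sc
-- ===== SOURCE A (Python) =====
-- def sc(s):
--
--     #https://www.codewars.com/kata/5710a50d336aed828100055a/train/python
--
--     count = 0
--     for i in range(len(s)):
--         count += 1
--         if i < len(s) -1:
--             count += 1
--             if s[i] != s[i+1]:
--                 count += 5
--     return count
-- ===== SOURCE B (Python) =====
-- def sc(s):
--     if not s:
--         return 0
--     runs = 0
--     rest = s
--     while rest:
--         runs += 1
--         rest = rest.lstrip(rest[0])
--     return 2 * len(s) + 5 * runs - 6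
-- ===== Notes on version B (the rewrite author's own statement) =====
-- stated objective: alternative
-- what changed: B segments the string into maximal runs of equal characters by repeatedly lstrip-ping the leading character, counts the runs R, and returns 2*len(s)+5*R-6 (0 for empty), instead of A's per-index loop with nested conditional increments.
import Mathlib
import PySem

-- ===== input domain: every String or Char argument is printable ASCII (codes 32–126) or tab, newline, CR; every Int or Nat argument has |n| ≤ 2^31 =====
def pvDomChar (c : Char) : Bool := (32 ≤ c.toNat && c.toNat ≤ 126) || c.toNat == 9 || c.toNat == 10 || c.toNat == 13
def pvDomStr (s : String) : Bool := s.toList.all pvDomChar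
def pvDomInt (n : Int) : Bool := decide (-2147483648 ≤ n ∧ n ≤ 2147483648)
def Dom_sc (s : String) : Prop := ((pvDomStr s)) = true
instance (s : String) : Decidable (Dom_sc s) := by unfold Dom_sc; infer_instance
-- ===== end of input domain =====

-- B replaces A's per-index loop (nested conditional increments) by run segmentation:
-- it strips maximal runs of the leading character, counts the runs R, and returns
-- 2*len(s)+5*R-6 (0 for empty); objective: alternative.

-- ===== PORT A =====
-- for i in range(len(s)): count += 1; if i < len(s)-1: count += 1; if s[i] != s[i+1]: count += 5
def sc (s : String) : Int :=
  let l := s.toList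
  (List.range l.length).foldl (fun count i =>
    let count := count + 1
    if i < l.length - 1 then
      let count := count + 1
      if l.getD i ' ' ≠ l.getD (i+1) ' ' then count + 5 else count
    else count) 0

-- ===== PORT B =====
-- the while loop: while rest: runs += 1; rest = rest.lstrip(rest[0])
-- (lstrip with a one-character argument removes exactly the leading run = dropWhile)
def pvRunLoop : List Char → Nat → Nat
  | [], runs => runs
  | c :: rest, runs => pvRunLoop (rest.dropWhile (· == c)) (runs + 1)
termination_by l _ => l.length
decreasing_by
  simp only [List.length_cons]
  exact Nat.lt_succ_of_le (rest.length_dropWhile_le _)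

def sc_alt (s : String) : Int :=
  let l := s.toList
  if l = [] then 0
  else 2 * (l.length : Int) + 5 * (pvRunLoop l 0 : Int) - 6

-- ===== PRECONDITION & SPEC =====
def Spec_sc (s : String) (out : Int) : Prop := out = sc_alt s
instance (s : String) (out : Int) : Decidable (Spec_sc s out) := by unfold Spec_sc; infer_instance

-- ===== CLAIM (what is proved, stated in full; the proofs are below) =====
def Claim_equal_sc : Prop := ∀ (s : String), Dom_sc s → Spec_sc s (sc s)

-- ===== LEMMAS AND PROOFS =====

-- number of adjacent differing pairs
def pvD (l : List Char) : Nat := (l.zip l.tail).countP (fun p => p.1 ≠ p.2)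

-- per-index contribution of A's loop body
def pvG (l : List Char) (i : Nat) : Int :=
  1 + (if i < l.length - 1 then 1 + (if l.getD i ' ' ≠ l.getD (i+1) ' ' then 5 else 0) else 0)

theorem pvStep_eq (l : List Char) (c : Int) (i : Nat) :
    (let count := c + 1
     if i < l.length - 1 then
       let count := count + 1
       if l.getD i ' ' ≠ l.getD (i+1) ' ' then count + 5 else count
     else count) = c + pvG l i := by
  simp only [pvG]
  split_ifs <;> ring

theorem pvFoldl_eq_sum (l : List Char) (c : Int) (idxs : List Nat) :
    idxs.foldl (fun count i =>
      let count := count + 1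
      if i < l.length - 1 then
        let count := count + 1
        if l.getD i ' ' ≠ l.getD (i+1) ' ' then count + 5 else count
      else count) c = c + (idxs.map (pvG l)).sum := by
  induction idxs generalizing c with
  | nil => simp
  | cons i t ih =>
      simp only [List.foldl_cons, List.map_cons, List.sum_cons]
      rw [pvStep_eq, ih]
      ring

theorem pvG_shift (a b : Char) (t : List Char) (i : Nat) :
    pvG (a :: b :: t) (i + 1) = pvG (b :: t) i := by
  simp only [pvG, List.length_cons, List.getD_cons_succ]
  have : i + 1 < t.length + 1 + 1 - 1 ↔ i < t.length + 1 - 1 := by omega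
  rw [if_congr this rfl rfl]

-- A's loop total equals the closed form 2n-1+5D on nonempty lists
theorem pvSum_eq (l : List Char) :
    ((List.range l.length).map (pvG l)).sum =
      (if l = [] then 0 else 2 * (l.length : Int) - 1 + 5 * (pvD l : Int)) := by
  induction l with
  | nil => simp
  | cons a t ih =>
      cases t with
      | nil => simp [pvG, pvD, List.range_succ]
      | cons b t2 =>
          have hr : List.range (a :: b :: t2).length =
              0 :: (List.range (b :: t2).length).map (· + 1) := by
            simp [List.length_cons, List.range_succ_eq_map]
          rw [hr]
          simp only [List.map_cons, List.sum_cons, List.map_map]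
          have hm : ((List.range (b :: t2).length).map (pvG (a :: b :: t2) ∘ (· + 1))) =
              (List.range (b :: t2).length).map (pvG (b :: t2)) := by
            apply List.map_congr_left
            intro i _
            exact pvG_shift a b t2 i
          rw [hm, ih]
          have h0 : pvG (a :: b :: t2) 0 = 2 + (if a ≠ b then (5:Int) else 0) := by
            simp [pvG]; split_ifs <;> ring
          rw [h0]
          simp only [pvD, List.zip_cons_cons, List.countP_cons, List.tail_cons,
            List.length_cons, if_neg (List.cons_ne_nil b t2), if_neg (List.cons_ne_nil a (b::t2))]
          by_cases h : a = b <;> simp [h] <;> ring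

theorem pvRunLoop_acc (l : List Char) (r : Nat) : pvRunLoop l r = r + pvRunLoop l 0 := by
  induction hn : l.length using Nat.strong_induction_on generalizing l r with
  | _ n ih =>
    match l with
    | [] => simp [pvRunLoop]
    | c :: rest =>
      simp only [pvRunLoop]
      have hlen : (rest.dropWhile (· == c)).length < n := by
        have := rest.length_dropWhile_le (· == c)
        simp at hn; omega
      rw [ih _ hlen _ _ rfl, ih _ hlen _ 1 rfl]
      omega

-- B's run count equals D + 1 on nonempty lists
theorem pvRunLoop_eq_D (l : List Char) (h : l ≠ []) : pvRunLoop l 0 = pvD l + 1 := by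
  induction hn : l.length using Nat.strong_induction_on generalizing l with
  | _ n ih =>
    match l, h with
    | [c], _ => simp [pvRunLoop, pvD]
    | c :: b :: t, _ =>
      by_cases hbc : b = c
      · subst hbc
        have h1 : pvRunLoop (b :: b :: t) 0 = pvRunLoop (b :: t) 0 := by
          simp [pvRunLoop, List.dropWhile]
        have h2 : pvD (b :: b :: t) = pvD (b :: t) := by
          simp [pvD, List.zip_cons_cons]
        rw [h1, h2]
        exact ih (b :: t).length (by simp [← hn]) (b :: t) (by simp) rfl
      · have h1 : pvRunLoop (c :: b :: t) 0 = 1 + pvRunLoop (b :: t) 0 := by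
          have hd : (b :: t).dropWhile (· == c) = b :: t := by
            simp [hbc]
          rw [pvRunLoop, hd, pvRunLoop_acc]
        have h2 : pvD (c :: b :: t) = 1 + pvD (b :: t) := by
          simp only [pvD, List.zip_cons_cons, List.tail_cons, List.countP_cons]
          rw [if_pos (by simp; exact fun h => hbc h.symm)]
          omega
        rw [h1, h2, ih (b :: t).length (by simp [← hn]) (b :: t) (by simp) rfl]
        omega

-- ===== VERDICT (by name: the statement is the Claim_ definition above) =====
theorem sc_spec : Claim_equal_sc := by
  intro s _
  unfold Spec_sc sc sc_alt
  simp only []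
  rw [pvFoldl_eq_sum, pvSum_eq]
  by_cases h : s.toList = []
  · simp [h]
  · rw [if_neg h, if_neg h, pvRunLoop_eq_D _ h]
    push_cast
    ring
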